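-- pv_equiv track=rewrite | github.com/nuomifan666/lanqiaobei | 划分（暴力）.py | max_partition_product
-- ===== SOURCE A (Python) =====
-- def max_partition_product(nums):
--     n = len(nums)
--     total_sum = sum(nums)
--     max_product = 0
--
--     # 遍历所有可能的划分（从 1 到 2^n - 2，确保每组至少有一个元素）
--     for mask in range(1, 1 << n):
--         group1_sum = sum(nums[i] for i in range(n) if mask & (1 << i))
--         group2_sum = total_sum - group1_sum
--         product = group1_sum * group2_sum
--         max_product = max(max_product, product)
--
--     return max_product
-- ===== SOURCE B (Python) =====
-- def max_partition_product(nums):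
--     total = sum(nums)
--     sums = {0}
--     for x in nums:
--         sums |= {s + x for s in sums}
--     best = 0
--     for s in sums:
--         best = max(best, s * (total - s))
--     return best
-- ===== Notes on version B (the rewrite author's own statement) =====
-- stated objective: faster
-- what changed: Replaces A's enumeration of all 2^n bitmasks (each with an O(n) inner sum) by a set-based subset-sum DP that collects the distinct achievable subset sums in one pass over nums and then maximizes s*(total-s) over that set.
import Mathlib
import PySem

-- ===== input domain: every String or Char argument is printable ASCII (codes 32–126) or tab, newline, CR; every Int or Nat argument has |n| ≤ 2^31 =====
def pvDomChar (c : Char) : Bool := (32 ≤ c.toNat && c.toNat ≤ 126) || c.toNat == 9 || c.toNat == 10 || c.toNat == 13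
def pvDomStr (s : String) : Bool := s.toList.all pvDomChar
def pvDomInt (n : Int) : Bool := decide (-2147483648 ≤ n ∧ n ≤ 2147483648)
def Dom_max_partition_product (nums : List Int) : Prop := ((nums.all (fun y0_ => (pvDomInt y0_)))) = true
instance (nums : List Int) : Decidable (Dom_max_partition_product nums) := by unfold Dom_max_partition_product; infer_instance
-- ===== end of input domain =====

-- B replaces A's enumeration of all 2^n bitmasks by a subset-sum set DP over the
-- distinct achievable subset sums, maximizing s*(total-s); objective: faster.

-- ===== PORT A =====
-- literal port of A: for mask in range(1, 1 << n): sum nums[i] over set bits, take max product.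
-- i ranges over [0, n), so nums[i] never raises; pyGetD …​ 0 is exact there.  i.toNat is exact since i ≥ 0.
def max_partition_product (nums : List Int) : Int :=
  let n : Int := nums.length
  let total_sum : Int := nums.foldl (· + ·) 0
  (PySem.List.pyRange 1 ((1 : Int) <<< nums.length) 1).foldl
    (fun max_product mask =>
      let group1_sum : Int :=
        (PySem.List.pyRange 0 n 1).foldl
          (fun acc i =>
            if PySem.Int.band mask ((1 : Int) <<< i.toNat) ≠ 0 then
              acc + PySem.List.pyGetD nums i 0
            else acc) 0
      let group2_sum := total_sum - group1_sum
      let product := group1_sum * group2_sum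
      max max_product product) 0

-- ===== PORT B =====
-- literal port of Source B: sums = {0}; for x: sums |= {s+x for s in sums}; best = max over sums
-- (the final loop consumes the set only through max, which is order-independent).
def max_partition_product_alt (nums : List Int) : Int :=
  let total : Int := nums.foldl (· + ·) 0
  let sums : PySem.Set Int :=
    nums.foldl (fun S x => PySem.Set.update S (S.map (fun s => s + x))) (PySem.Set.ofList [0])
  sums.foldl (fun best s => max best (s * (total - s))) 0

-- ===== PRECONDITION & SPEC =====
def Spec_max_partition_product (nums : List Int) (out : Int) : Prop := out = max_partition_product_alt nums
instance (nums : List Int) (out : Int) : Decidable (Spec_max_partition_product nums out) := by unfold Spec_max_partition_product; infer_instance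

-- ===== CLAIM (what is proved, stated in full; the proofs are below) =====
def Claim_equal_max_partition_product : Prop := ∀ (nums : List Int), Dom_max_partition_product nums → Spec_max_partition_product nums (max_partition_product nums)

-- ===== LEMMAS AND PROOFS =====

-- group1_sum of a nonnegative mask, read bit by bit
def gsN : List Int → Nat → Int
  | [], _ => 0
  | x :: r, m => (if m % 2 = 1 then x else 0) + gsN r (m / 2)

-- "d is the sum of some subset of nums"
def SubSum : List Int → Int → Prop
  | [], d => d = 0
  | x :: r, d => SubSum r d ∨ SubSum r (d - x)

theorem gsN_zero (nums : List Int) : gsN nums 0 = 0 := by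
  induction nums with
  | nil => rfl
  | cons x r ih => simp [gsN, ih]

theorem gsN_subsum (nums : List Int) (m : Nat) : SubSum nums (gsN nums m) := by
  induction nums generalizing m with
  | nil => rfl
  | cons x r ih =>
    by_cases h : m % 2 = 1
    · exact Or.inr (by simpa [gsN, h] using ih (m / 2))
    · exact Or.inl (by simpa [gsN, h] using ih (m / 2))

theorem subsum_gsN (nums : List Int) (d : Int) (h : SubSum nums d) :
    ∃ m : Nat, m < 2 ^ nums.length ∧ gsN nums m = d := by
  induction nums generalizing d with
  | nil => exact ⟨0, by simpa using h.symm ▸ by simp [gsN]⟩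
  | cons x r ih =>
    rcases h with h | h
    · obtain ⟨m, hm, hgs⟩ := ih d h
      refine ⟨2 * m, by simpa [pow_succ] using by omega, ?_⟩
      simp [gsN, hgs, Nat.mul_mod_right]
    · obtain ⟨m, hm, hgs⟩ := ih (d - x) h
      refine ⟨2 * m + 1, by simpa [pow_succ] using by omega, ?_⟩
      have h2 : (2 * m + 1) / 2 = m := by omega
      have h1 : (2 * m + 1) % 2 = 1 := by omega
      simp [gsN, h1, h2, hgs]

-- the inner index fold of A computes gsN
theorem inner_eq_gsN (nums : List Int) (m : Nat) :
    (List.range nums.length).foldl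
      (fun acc i => if m.testBit i then acc + nums.getD i 0 else acc) 0 = gsN nums m := by
  suffices h : ∀ (nums : List Int) (m : Nat) (a : Int),
      (List.range nums.length).foldl
        (fun acc i => if m.testBit i then acc + nums.getD i 0 else acc) a = a + gsN nums m by
    simpa using h nums m 0
  intro nums
  induction nums with
  | nil => intro m a; simp [gsN]
  | cons x r ih =>
    intro m a
    rw [List.length_cons, List.range_succ_eq_map, List.foldl_cons, List.foldl_map]
    have hfun : (fun (acc : Int) (i : Nat) =>
        if m.testBit (i + 1) then acc + (x :: r).getD (i + 1) 0 else acc)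
        = (fun acc i => if (m / 2).testBit i then acc + r.getD i 0 else acc) := by
      funext acc i
      rw [Nat.testBit_add_one]
      rfl
    rw [hfun, ih (m / 2)]
    by_cases h : m % 2 = 1
    · simp [gsN, Nat.testBit_zero, h]
      ring
    · simp [gsN, Nat.testBit_zero, h]

-- membership in B's DP set ↔ subset-sum reachability
theorem dp_mem (nums : List Int) (S : List Int) (t : Int) :
    t ∈ nums.foldl (fun S x => PySem.Set.update S (S.map (fun s => s + x))) S
      ↔ ∃ u ∈ S, SubSum nums (t - u) := by
  induction nums generalizing S with
  | nil => simp [SubSum, sub_eq_zero]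
  | cons x r ih =>
    rw [List.foldl_cons, ih]
    constructor
    · rintro ⟨u, hu, hss⟩
      rw [PySem.Set.mem_update] at hu
      rcases hu with hu | hu
      · exact ⟨u, hu, Or.inl hss⟩
      · obtain ⟨v, hv, rfl⟩ := List.mem_map.mp hu
        exact ⟨v, hv, Or.inr (by simpa [sub_sub] using hss)⟩
    · rintro ⟨u, hu, hss | hss⟩
      · refine ⟨u, ?_, hss⟩
        rw [PySem.Set.mem_update]; exact Or.inl hu
      · refine ⟨u + x, ?_, by simpa [sub_sub] using hss⟩
        rw [PySem.Set.mem_update]; exact Or.inr (List.mem_map.mpr ⟨u, hu, rfl⟩)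

-- a fold of max over f: lower bounds and achievement
theorem maxfold_spec (L : List Int) (f : Int → Int) (a : Int) :
    a ≤ L.foldl (fun m s => max m (f s)) a
    ∧ (∀ s ∈ L, f s ≤ L.foldl (fun m s => max m (f s)) a)
    ∧ (L.foldl (fun m s => max m (f s)) a = a ∨ ∃ s ∈ L, L.foldl (fun m s => max m (f s)) a = f s) := by
  induction L generalizing a with
  | nil => simp
  | cons y t ih =>
    obtain ⟨h1, h2, h3⟩ := ih (max a (f y))
    refine ⟨le_trans (le_max_left _ _) h1, ?_, ?_⟩
    · intro s hs
      rcases List.mem_cons.mp hs with rfl | hs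
      · exact le_trans (le_max_right _ _) h1
      · exact h2 s hs
    · rcases h3 with h3 | ⟨s, hs, h3⟩
      · rcases max_choice a (f y) with hm | hm
        · exact Or.inl (by rw [List.foldl_cons, h3, hm])
        · exact Or.inr ⟨y, List.mem_cons_self, by rw [List.foldl_cons, h3, hm]⟩
      · exact Or.inr ⟨s, List.mem_cons_of_mem _ hs, by simpa [List.foldl_cons] using h3⟩

-- A's inner group1_sum, rewritten: for 0 ≤ mask it is gsN nums mask.toNat
theorem group1_eq (nums : List Int) (mask : Int) (hm : 0 ≤ mask) :
    (PySem.List.pyRange 0 (nums.length : Int) 1).foldl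
      (fun acc i =>
        if PySem.Int.band mask ((1 : Int) <<< i.toNat) ≠ 0 then
          acc + PySem.List.pyGetD nums i 0
        else acc) 0 = gsN nums mask.toNat := by
  obtain ⟨m, rfl⟩ := Int.eq_ofNat_of_zero_le hm
  rw [PySem.List.pyRange_zero_nat, List.foldl_map, Int.toNat_natCast]
  rw [← inner_eq_gsN nums m]
  congr 1
  funext acc j
  simp only [Int.toNat_natCast, PySem.List.pyGetD_natCast, Int.one_shiftLeft]
  have hbit : (PySem.Int.band ((m : Nat) : Int) ((2 : Int) ^ j) ≠ 0) ↔ m.testBit j := by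
    have hc : ((2 : Int) ^ j) = ((2 ^ j : Nat) : Int) := by push_cast; ring
    rw [hc, PySem.Int.band_natCast m (2 ^ j)]
    simp [Nat.and_two_pow]
  by_cases h : m.testBit j <;> simp [hbit, h]

-- ===== VERDICT (by name: the statement is the Claim_ definition above) =====
theorem max_partition_product_spec : Claim_equal_max_partition_product := by
  intro nums _
  unfold Spec_max_partition_product max_partition_product max_partition_product_alt
  simp only []
  set total := nums.foldl (· + ·) 0 with htotal
  set P : Int → Int := fun s => s * (total - s) with hP
  -- rewrite A's outer fold into max-fold form over f1
  set f1 : Int → Int := fun mask =>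
    P ((PySem.List.pyRange 0 (nums.length : Int) 1).foldl
      (fun acc i =>
        if PySem.Int.band mask ((1 : Int) <<< i.toNat) ≠ 0 then
          acc + PySem.List.pyGetD nums i 0
        else acc) 0) with hf1
  have hshape : (PySem.List.pyRange 1 ((1 : Int) <<< nums.length) 1).foldl
      (fun max_product mask =>
        let group1_sum : Int :=
          (PySem.List.pyRange 0 (nums.length : Int) 1).foldl
            (fun acc i =>
              if PySem.Int.band mask ((1 : Int) <<< i.toNat) ≠ 0 then
                acc + PySem.List.pyGetD nums i 0
              else acc) 0
        let group2_sum := total - group1_sum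
        let product := group1_sum * group2_sum
        max max_product product) 0
      = (PySem.List.pyRange 1 ((1 : Int) <<< nums.length) 1).foldl
          (fun m mask => max m (f1 mask)) 0 := rfl
  rw [hshape]
  set L1 := PySem.List.pyRange 1 ((1 : Int) <<< nums.length) 1 with hL1
  set sums := nums.foldl (fun S x => PySem.Set.update S (S.map (fun s => s + x)))
    (PySem.Set.ofList [0]) with hsums
  obtain ⟨ha0, ha2, ha3⟩ := maxfold_spec L1 f1 0
  obtain ⟨hb0, hb2, hb3⟩ := maxfold_spec sums P 0
  have hS0 : PySem.Set.ofList [0] = ([0] : List Int) := rfl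
  have hmemsums : ∀ t : Int, t ∈ sums ↔ SubSum nums t := by
    intro t
    rw [hsums, hS0, dp_mem]
    constructor
    · rintro ⟨u, hu, hss⟩
      simp only [List.mem_singleton] at hu
      simpa [hu] using hss
    · intro h; exact ⟨0, by simp, by simpa using h⟩
  have hpow : ((1 : Int) <<< nums.length) = ((2 ^ nums.length : Nat) : Int) := by
    simp [Int.shiftLeft_eq]
  have hmemL1 : ∀ mask : Int, mask ∈ L1 ↔ 1 ≤ mask ∧ mask < ((2 ^ nums.length : Nat) : Int) := by
    intro mask; rw [hL1, hpow, PySem.List.mem_pyRange_one]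
  have hf1app : ∀ mask : Int, 0 ≤ mask → f1 mask = P (gsN nums mask.toNat) :=
    fun mask hm => congrArg P (group1_eq nums mask hm)
  apply le_antisymm
  · -- A ≤ B
    rcases ha3 with h | ⟨mask, hmask, h⟩
    · rw [h]; exact hb0
    · obtain ⟨h1m, h2m⟩ := (hmemL1 mask).mp hmask
      rw [h, hf1app mask (le_trans (by norm_num) h1m)]
      apply hb2
      rw [hmemsums]
      exact gsN_subsum nums mask.toNat
  · -- B ≤ A
    rcases hb3 with h | ⟨s, hs, h⟩
    · rw [h]; exact ha0
    · rw [h]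
      obtain ⟨m, hmlt, hgs⟩ := subsum_gsN nums s ((hmemsums s).mp hs)
      rcases Nat.eq_zero_or_pos m with rfl | hmpos
      · rw [← hgs, gsN_zero]
        simpa [hP] using ha0
      · have hmem : ((m : Nat) : Int) ∈ L1 := by
          rw [hmemL1]
          exact ⟨by exact_mod_cast hmpos, by exact_mod_cast hmlt⟩
        have hle := ha2 _ hmem
        rw [hf1app ((m : Nat) : Int) (by positivity)] at hle
        simpa [Int.toNat_natCast, hgs] using hle
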